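-- pv_equiv track=rewrite | github.com/darklab-sh/darklab-shell | app/blueprints/run.py | _split_pty_entries
-- ===== SOURCE A (Python) =====
-- def _split_pty_entries(entries: list[dict[str, str]]) -> tuple[list[dict[str, str]], list[dict[str, str]]]:
--     marker_index = next(
--         (index for index, entry in enumerate(entries) if entry.get("cls") == "pty-marker"),
--         -1,
--     )
--     if marker_index < 0:
--         return entries, []
--     return entries[:marker_index], entries[marker_index + 1:]
-- ===== SOURCE B (Python) =====
-- def _split_pty_entries(entries: list[dict[str, str]]) -> tuple[list[dict[str, str]], list[dict[str, str]]]: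
--     before = []
--     after = []
--     found = False
--     for entry in entries:
--         if not found and entry.get("cls") == "pty-marker":
--             found = True
--         elif found:
--             after.append(entry)
--         else:
--             before.append(entry)
--     if not found:
--         return entries, []
--     return before, after
-- ===== Notes on version B (the rewrite author's own statement) =====
-- stated objective: alternative
-- what changed: Replaced the enumerate-generator index search plus two slices by a single accumulating partition pass with a found flag and two accumulator lists; the no-marker case still returns the original entries list.
import Mathlib
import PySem

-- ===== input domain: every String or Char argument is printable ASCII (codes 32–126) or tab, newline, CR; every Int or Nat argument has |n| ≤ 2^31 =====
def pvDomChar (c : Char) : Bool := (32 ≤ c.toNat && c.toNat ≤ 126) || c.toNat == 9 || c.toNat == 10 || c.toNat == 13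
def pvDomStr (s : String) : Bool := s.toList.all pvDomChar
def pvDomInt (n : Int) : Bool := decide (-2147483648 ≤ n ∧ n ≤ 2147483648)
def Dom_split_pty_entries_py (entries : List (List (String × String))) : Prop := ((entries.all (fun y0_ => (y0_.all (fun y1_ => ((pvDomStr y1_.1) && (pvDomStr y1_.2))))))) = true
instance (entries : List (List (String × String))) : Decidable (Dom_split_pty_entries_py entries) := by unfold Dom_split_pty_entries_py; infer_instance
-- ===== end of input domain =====

-- B replaces the enumerate-index search plus two slices by a single accumulating
-- partition pass with a found flag (alternative decomposition, same cost).

-- ===== PORT A =====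
-- entry.get("cls") == "pty-marker"
def pvIsMarker (entry : List (String × String)) : Bool :=
  (PySem.Dict.mk entry).get? "cls" == some "pty-marker"

-- next((index for index, entry in enumerate(entries) if entry.get("cls") == "pty-marker"), -1)
def pvMarkerIndex : List (List (String × String)) → Int → Int
  | [], _ => -1
  | e :: rest, i => if pvIsMarker e then i else pvMarkerIndex rest (i + 1)

def split_pty_entries_py (entries : List (List (String × String))) :
    (List (List (String × String))) × (List (List (String × String))) :=
  let marker_index := pvMarkerIndex entries 0
  if marker_index < 0 then (entries, [])
  else (PySem.List.slice entries none (some marker_index),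
        PySem.List.slice entries (some (marker_index + 1)) none)

-- ===== PORT B =====
-- loop body of B: state (before, after, found)
def pvStep (st : List (List (String × String)) × List (List (String × String)) × Bool)
    (entry : List (String × String)) :
    List (List (String × String)) × List (List (String × String)) × Bool :=
  if !st.2.2 && pvIsMarker entry then (st.1, st.2.1, true)
  else if st.2.2 then (st.1, st.2.1 ++ [entry], true)
  else (st.1 ++ [entry], st.2.1, false)

def split_pty_entries_py_alt (entries : List (List (String × String))) :
    (List (List (String × String))) × (List (List (String × String))) :=
  let s := entries.foldl pvStep ([], [], false)
  if s.2.2 then (s.1, s.2.1) else (entries, [])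

-- ===== PRECONDITION & SPEC =====
def Spec_split_pty_entries_py (entries : List (List (String × String))) (out : (List (List (String × String))) × (List (List (String × String)))) : Prop := out = split_pty_entries_py_alt entries
instance (entries : List (List (String × String))) (out : (List (List (String × String))) × (List (List (String × String)))) : Decidable (Spec_split_pty_entries_py entries out) := by unfold Spec_split_pty_entries_py; infer_instance

-- ===== CLAIM (what is proved, stated in full; the proofs are below) =====
def Claim_equal_split_pty_entries_py : Prop := ∀ (entries : List (List (String × String))), Dom_split_pty_entries_py entries → Spec_split_pty_entries_py entries (split_pty_entries_py entries)

-- ===== LEMMAS AND PROOFS =====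
-- common reference: split at the first marker, if any
def pvSplitSpec : List (List (String × String)) →
    Option (List (List (String × String)) × List (List (String × String)))
  | [] => none
  | e :: rest =>
    if pvIsMarker e then some ([], rest)
    else (pvSplitSpec rest).map (fun p => (e :: p.1, p.2))

lemma pvMarkerIndex_cases (xs : List (List (String × String))) (i : Int) (hi : 0 ≤ i) :
    (pvMarkerIndex xs i = -1 ∧ pvMarkerIndex xs 0 = -1) ∨
      (pvMarkerIndex xs i = pvMarkerIndex xs 0 + i ∧ 0 ≤ pvMarkerIndex xs 0) := by
  induction xs generalizing i with
  | nil => left; exact ⟨rfl, rfl⟩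
  | cons e rest ih =>
    by_cases h : pvIsMarker e
    · right; simp only [pvMarkerIndex, h, if_true]; omega
    · simp only [pvMarkerIndex, h, Bool.false_eq_true, if_false, zero_add]
      rcases ih (i + 1) (by omega) with ⟨ha, hb⟩ | ⟨ha, hb⟩ <;>
        rcases ih 1 (by omega) with ⟨hc, hd⟩ | ⟨hc, hd⟩ <;> omega

lemma pvSplitSpec_none_iff (xs : List (List (String × String))) :
    pvSplitSpec xs = none ↔ pvMarkerIndex xs 0 = -1 := by
  induction xs with
  | nil => simp [pvSplitSpec, pvMarkerIndex]
  | cons e rest ih =>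
    by_cases h : pvIsMarker e
    · simp [pvSplitSpec, pvMarkerIndex, h]
    · simp only [pvSplitSpec, pvMarkerIndex, h, Bool.false_eq_true, if_false, zero_add]
      rcases pvMarkerIndex_cases rest 1 (by omega) with ⟨ha, hb⟩ | ⟨ha, hb⟩ <;>
        rw [ha] <;> simp [Option.map_eq_none_iff, ih, hb] <;> omega

lemma portA_eq_spec (xs : List (List (String × String))) :
    split_pty_entries_py xs =
      match pvSplitSpec xs with
      | none => (xs, [])
      | some p => p := by
  induction xs with
  | nil => rfl
  | cons e rest ih =>
    by_cases h : pvIsMarker e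
    · simp [split_pty_entries_py, pvMarkerIndex, pvSplitSpec, h,
        PySem.List.slice_to, PySem.List.slice_from]
    · rcases pvMarkerIndex_cases rest 1 (by omega) with ⟨ha, hb⟩ | ⟨ha, hb⟩
      · have hspec : pvSplitSpec rest = none := (pvSplitSpec_none_iff rest).mpr hb
        simp [split_pty_entries_py, pvMarkerIndex, pvSplitSpec, h, ha, hspec]
      · have hmne : ¬ (pvMarkerIndex rest 0 = -1) := by omega
        have hspec : pvSplitSpec rest = some (PySem.List.slice rest none (some (pvMarkerIndex rest 0)),
            PySem.List.slice rest (some (pvMarkerIndex rest 0 + 1)) none) := by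
          cases hs : pvSplitSpec rest with
          | none => exact absurd ((pvSplitSpec_none_iff rest).mp hs) hmne
          | some p =>
            have hArest : split_pty_entries_py rest = p := by rw [ih, hs]
            unfold split_pty_entries_py at hArest
            rw [if_neg (by omega)] at hArest
            exact congrArg some hArest.symm
        simp only [split_pty_entries_py, pvMarkerIndex, h, Bool.false_eq_true, if_false,
          zero_add, ha]
        rw [if_neg (by omega)]
        simp only [pvSplitSpec, h, Bool.false_eq_true, if_false, hspec, Option.map_some]
        obtain ⟨k, hk⟩ : ∃ k : ℕ, pvMarkerIndex rest 0 = (k : Int) :=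
          ⟨(pvMarkerIndex rest 0).toNat, by omega⟩
        rw [hk]
        refine Prod.ext ?_ ?_
        · dsimp only
          rw [PySem.List.slice_to _ (by omega), PySem.List.slice_to _ (by omega)]
          have ht : ((k : Int) + 1).toNat = k + 1 := by omega
          have ht0 : ((k : Int)).toNat = k := by omega
          rw [ht, ht0, List.take_succ_cons]
        · dsimp only
          rw [PySem.List.slice_from _ (by omega), PySem.List.slice_from _ (by omega)]
          have ht2 : ((k : Int) + 1 + 1).toNat = k + 2 := by omega
          have ht1 : ((k : Int) + 1).toNat = k + 1 := by omega
          rw [ht2, ht1, List.drop_succ_cons]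

lemma pvStep_found (st1 st2 : List (List (String × String))) (e : List (String × String)) :
    pvStep (st1, st2, true) e = (st1, st2 ++ [e], true) := by
  simp [pvStep]

lemma pvStep_not_found (st1 st2 : List (List (String × String))) (e : List (String × String)) :
    pvStep (st1, st2, false) e =
      if pvIsMarker e then (st1, st2, true) else (st1 ++ [e], st2, false) := by
  by_cases h : pvIsMarker e <;> simp [pvStep, h]

lemma portB_found (xs : List (List (String × String))) (acc_b acc_a : List (List (String × String))) :
    xs.foldl pvStep (acc_b, acc_a, true) = (acc_b, acc_a ++ xs, true) := by
  induction xs generalizing acc_a with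
  | nil => simp
  | cons e rest ih => rw [List.foldl_cons, pvStep_found, ih]; simp

lemma portB_invariant (xs acc : List (List (String × String))) :
    xs.foldl pvStep (acc, [], false) =
      match pvSplitSpec xs with
      | none => (acc ++ xs, [], false)
      | some p => (acc ++ p.1, p.2, true) := by
  induction xs generalizing acc with
  | nil => simp [pvSplitSpec]
  | cons e rest ih =>
    rw [List.foldl_cons, pvStep_not_found]
    by_cases h : pvIsMarker e
    · simp [h, pvSplitSpec, portB_found]
    · rw [if_neg (by simp [h])]
      rw [ih (acc ++ [e])]
      simp only [pvSplitSpec, h, Bool.false_eq_true, if_false]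
      cases hs : pvSplitSpec rest with
      | none => simp
      | some p => simp

lemma portB_eq_spec (xs : List (List (String × String))) :
    split_pty_entries_py_alt xs =
      match pvSplitSpec xs with
      | none => (xs, [])
      | some p => p := by
  unfold split_pty_entries_py_alt
  rw [portB_invariant xs []]
  cases hs : pvSplitSpec xs with
  | none => simp
  | some p => simp

-- ===== VERDICT (by name: the statement is the Claim_ definition above) =====
theorem split_pty_entries_py_spec : Claim_equal_split_pty_entries_py := by
  intro entries _
  unfold Spec_split_pty_entries_py
  rw [portA_eq_spec, portB_eq_spec]
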